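-- pv_equiv track=rewrite | github.com/sarahfunk/CSE231 | proj09.py | check_characters
-- ===== SOURCE A (Python) =====
-- def check_characters(password, characters):
--     '''Check characters function takes in a password
--     and a type of characters then returns true if any
--     of the character types are in the password'''
--
--     counter = 0
--     for ch in password:
--         if ch in characters:
--             return True
--         else:
--             counter +=1
--     if counter == len(password):
--         return False
-- ===== SOURCE B (Python) =====
-- def check_characters(password, characters):
--     '''Check characters function takes in a password
--     and a type of characters then returns true if any
--     of the character types are in the password'''
--     return bool(set(password) & set(characters))
-- ===== Notes on version B (the rewrite author's own statement) =====
-- stated objective: idiomatic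
-- what changed: Replaced the explicit scan with a counter and early return by a single whole-collection set-intersection test: build set(password) and set(characters) and return whether their intersection is non-empty.
import Mathlib
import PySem

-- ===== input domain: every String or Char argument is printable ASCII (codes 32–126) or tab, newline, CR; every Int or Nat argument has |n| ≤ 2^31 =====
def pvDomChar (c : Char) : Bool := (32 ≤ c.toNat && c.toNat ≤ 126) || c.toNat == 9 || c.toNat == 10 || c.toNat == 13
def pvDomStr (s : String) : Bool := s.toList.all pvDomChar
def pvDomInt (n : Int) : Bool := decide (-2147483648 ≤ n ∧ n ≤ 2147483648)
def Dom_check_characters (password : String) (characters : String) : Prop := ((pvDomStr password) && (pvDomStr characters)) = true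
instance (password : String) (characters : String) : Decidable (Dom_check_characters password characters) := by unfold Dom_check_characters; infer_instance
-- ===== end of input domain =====

-- B replaces A's counted scan with an early return by one set-intersection non-emptiness test (idiomatic).

-- ===== PORT A =====
-- A's for-loop with its counter; on the empty suffix Python tests 'counter == len(password)'
-- (always true, returning False) and otherwise would fall through returning None — that branch
-- is unreachable, ported as false.
def checkLoopA (characters : String) (pwlen : Nat) : List Char → Nat → Bool
  | [], counter => if counter = pwlen then false else false
  | ch :: rest, counter =>
      if PySem.Chars.isIn [ch] characters.toList then true
      else checkLoopA characters pwlen rest (counter + 1)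

def check_characters (password : String) (characters : String) : Bool :=
  checkLoopA characters password.toList.length password.toList 0

-- ===== PORT B =====
-- bool(set(password) & set(characters))
def check_characters_alt (password : String) (characters : String) : Bool :=
  !(PySem.Set.inter (PySem.Set.ofList password.toList) (PySem.Set.ofList characters.toList)).isEmpty

-- ===== PRECONDITION & SPEC =====
def Spec_check_characters (password : String) (characters : String) (out : Bool) : Prop := out = check_characters_alt password characters
instance (password : String) (characters : String) (out : Bool) : Decidable (Spec_check_characters password characters out) := by unfold Spec_check_characters; infer_instance

-- ===== CLAIM (what is proved, stated in full; the proofs are below) =====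
def Claim_equal_check_characters : Prop := ∀ (password : String) (characters : String), Dom_check_characters password characters → Spec_check_characters password characters (check_characters password characters)

-- ===== LEMMAS AND PROOFS =====

-- 'ch in characters' on a single character is membership
lemma isIn_singleton_iff (a : Char) (s : List Char) :
    PySem.Chars.isIn [a] s = true ↔ a ∈ s := by
  rw [PySem.Chars.isIn_iff_infix]
  constructor
  · intro h; exact h.sublist.subset (by simp)
  · intro h
    obtain ⟨l, r, rfl⟩ := List.append_of_mem h
    exact ⟨l, r, by simp⟩

-- A's loop returns true iff some remaining character occurs in `characters`, independently of the counter
lemma checkLoopA_eq_any (characters : String) (pwlen : Nat) :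
    ∀ (rest : List Char) (counter : Nat),
      checkLoopA characters pwlen rest counter
        = rest.any (fun ch => PySem.Chars.isIn [ch] characters.toList) := by
  intro rest
  induction rest with
  | nil => intro counter; simp [checkLoopA]
  | cons ch rest ih =>
      intro counter
      simp only [checkLoopA, List.any_cons]
      split_ifs with h <;> simp [h, ih]

-- B's intersection is non-empty iff some password character occurs in `characters`
lemma alt_iff (password characters : String) :
    check_characters_alt password characters = true
      ↔ ∃ ch ∈ password.toList, ch ∈ characters.toList := by
  simp [check_characters_alt, PySem.Set.inter, List.isEmpty_eq_false_iff_exists_mem,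
    List.mem_filter, PySem.Set.contains, PySem.Set.mem_ofList]

-- ===== VERDICT (by name: the statement is the Claim_ definition above) =====
theorem check_characters_spec : Claim_equal_check_characters := by
  intro password characters _
  show check_characters password characters = check_characters_alt password characters
  rw [check_characters, checkLoopA_eq_any]
  rcases hb : check_characters_alt password characters with _ | _
  · simp only [List.any_eq_false]
    intro ch hch hin
    have : check_characters_alt password characters = true :=
      (alt_iff _ _).2 ⟨ch, hch, (isIn_singleton_iff ch _).1 hin⟩
    simp [hb] at this
  · obtain ⟨ch, hch, hc⟩ := (alt_iff _ _).1 hb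
    exact List.any_eq_true.2 ⟨ch, hch, (isIn_singleton_iff ch _).2 hc⟩
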